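-- pv_equiv track=rewrite | github.com/Barium/killer-sudoku-solver | solver/solver.py | validate_cols
-- ===== SOURCE A (Python) =====
-- Board = list[list[int]]
--
-- def validate_cols(board: Board) -> bool:
--     """ Validates columns on the board, verifying that no duplicates exist on a single column.
--
--     Only filled out cells will be validated, meaning a half filled out column can be valid provided
--     it does not contain any duplicates. This method only searches for duplicates, and stops
--     searching as soon as it discovers one.
--
--     :param board: The board to validate
--     :return: Returns a boolean True if no columns contain any duplicates
--     """
--     for row in range(9):
--         col_set = set()
--         for value in board[row]:
--             if value != 0:
--                 if value in col_set:
--                     return False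
--                 col_set.add(value)
--     return True
-- ===== SOURCE B (Python) =====
-- def validate_cols(board):
--     for row in range(9):
--         vals = sorted(v for v in board[row] if v != 0)
--         for x, y in zip(vals, vals[1:]):
--             if x == y:
--                 return False
--     return True
-- ===== Notes on version B (the rewrite author's own statement) =====
-- stated objective: alternative
-- what changed: Replaces the incremental set-membership duplicate check with sorting each row's non-zero values and scanning adjacent pairs for equality.
import Mathlib
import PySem

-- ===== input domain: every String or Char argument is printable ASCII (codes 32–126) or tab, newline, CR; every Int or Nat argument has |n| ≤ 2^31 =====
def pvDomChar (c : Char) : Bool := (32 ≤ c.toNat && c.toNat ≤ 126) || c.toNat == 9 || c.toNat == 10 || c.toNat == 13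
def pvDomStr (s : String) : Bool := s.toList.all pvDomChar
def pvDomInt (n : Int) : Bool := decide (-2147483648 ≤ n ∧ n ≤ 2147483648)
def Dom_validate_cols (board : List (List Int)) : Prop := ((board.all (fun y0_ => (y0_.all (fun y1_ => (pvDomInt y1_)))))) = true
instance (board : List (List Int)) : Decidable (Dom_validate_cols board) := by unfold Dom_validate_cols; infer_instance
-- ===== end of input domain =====

-- B replaces A's incremental set-membership duplicate check by sorting each row's
-- non-zero values and scanning adjacent pairs (alternative algorithm, same cost class).

-- ===== PORT A =====
-- inner loop of A: for value in row: if value != 0: if value in col_set: return False; col_set.add(value)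
def pvARow : List Int → PySem.Set Int → Bool
  | [], _ => true
  | v :: rest, s =>
    if v ≠ 0 then
      if PySem.Set.contains s v then false else pvARow rest (PySem.Set.add s v)
    else pvARow rest s

-- outer loop of A over range(9); board[row] raises IndexError outside Pre_ (none branch unreachable under Pre_)
def pvALoop (board : List (List Int)) : List Int → Bool
  | [] => true
  | r :: rs =>
    match PySem.List.pyGet? board r with
    | none => false
    | some row => if pvARow row PySem.Set.empty then pvALoop board rs else false

def validate_cols (board : List (List Int)) : Bool :=
  pvALoop board (PySem.List.pyRange 0 9 1)

-- ===== PORT B =====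
-- inner loop of B: for x, y in zip(vals, vals[1:]): if x == y: return False
def pvAdjDup : List Int → Bool
  | x :: y :: rest => if x == y then true else pvAdjDup (y :: rest)
  | _ => false

-- outer loop of B over range(9)
def pvBLoop (board : List (List Int)) : List Int → Bool
  | [] => true
  | r :: rs =>
    match PySem.List.pyGet? board r with
    | none => false
    | some row =>
      if pvAdjDup (PySem.List.sorted (row.filter (fun v => v != 0)) (fun x => x) false) then false
      else pvBLoop board rs

def validate_cols_alt (board : List (List Int)) : Bool :=
  pvBLoop board (PySem.List.pyRange 0 9 1)

-- ===== PRECONDITION & SPEC =====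
-- A indexes board[row] for row in range(9): a board with fewer than 9 rows raises IndexError (in B too)
-- unless some earlier row already contains a duplicate non-zero value (early return False in both)
def Pre_validate_cols (board : List (List Int)) : Prop :=
  9 ≤ board.length ∨ ∃ r ∈ board.take 9, ¬ (r.filter (fun v => v != 0)).Nodup
instance (board : List (List Int)) : Decidable (Pre_validate_cols board) := by
  unfold Pre_validate_cols; infer_instance

def pvWitness_validate_cols : List (List Int) :=
  [[1,2],[0,0,3],[],[4],[5,6,7],[8],[9],[1,3],[2,2]]

def Spec_validate_cols (board : List (List Int)) (out : Bool) : Prop := out = validate_cols_alt board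
instance (board : List (List Int)) (out : Bool) : Decidable (Spec_validate_cols board out) := by
  unfold Spec_validate_cols; infer_instance

-- ===== CLAIM (what is proved, stated in full; the proofs are below) =====
def Claim_equal_validate_cols : Prop := ∀ (board : List (List Int)), Dom_validate_cols board → Pre_validate_cols board → Spec_validate_cols board (validate_cols board)

-- ===== LEMMAS AND PROOFS =====

-- A's inner loop succeeds iff the non-zero values are distinct and avoid the seen-set
theorem pvARow_true_iff (row : List Int) (s : PySem.Set Int) :
    pvARow row s = true ↔
      (row.filter (fun v => v != 0)).Nodup ∧ ∀ v ∈ row.filter (fun v => v != 0), v ∉ s := by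
  induction row generalizing s with
  | nil => simp [pvARow]
  | cons v rest ih =>
    by_cases hv : v = 0
    · subst hv; simpa [pvARow] using ih s
    · by_cases hc : PySem.Set.contains s v
      · simp only [pvARow, if_pos hv, if_pos hc, List.filter_cons]
        have hvmem : v ∈ s := (PySem.Set.contains_iff s v).mp hc
        simp [hv, hvmem]
      · have hfc : List.filter (fun v => v != 0) (v :: rest)
            = v :: rest.filter (fun v => v != 0) := by simp [hv]
        simp only [pvARow, if_pos hv, if_neg hc, hfc]
        have hvnmem : v ∉ s := fun h => hc ((PySem.Set.contains_iff s v).mpr h)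
        rw [ih, List.nodup_cons, List.forall_mem_cons]
        constructor
        · rintro ⟨hnd, hall⟩
          have hvnot : v ∉ rest.filter (fun v => v != 0) := fun hmem =>
            (hall v hmem) ((PySem.Set.mem_add _ _ _).mpr (Or.inr rfl))
          exact ⟨⟨hvnot, hnd⟩, hvnmem, fun u hu hus =>
            (hall u hu) ((PySem.Set.mem_add _ _ _).mpr (Or.inl hus))⟩
        · rintro ⟨⟨hvnot, hnd⟩, _, hall⟩
          refine ⟨hnd, fun u hu hus => ?_⟩
          rcases (PySem.Set.mem_add _ _ _).mp hus with h | h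
          · exact hall u hu h
          · subst h; exact hvnot hu

-- adjacent-equal scan on a ≤-sorted list detects exactly non-Nodup
theorem pvAdjDup_sorted_iff (l : List Int) (hs : l.Pairwise (· ≤ ·)) :
    pvAdjDup l = true ↔ ¬ l.Nodup := by
  induction l with
  | nil => simp [pvAdjDup]
  | cons x t ih =>
    cases t with
    | nil => simp [pvAdjDup]
    | cons y r =>
      have hs' : (y :: r).Pairwise (· ≤ ·) := hs.of_cons
      by_cases hxy : x = y
      · subst hxy
        simp [pvAdjDup, List.nodup_cons]
      · have hxle : ∀ z ∈ y :: r, x ≤ z := fun z hz => (List.pairwise_cons.mp hs).1 z hz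
        have hxnot : x ∉ y :: r := by
          intro hx
          rcases List.mem_cons.mp hx with h | h
          · exact hxy h
          · have hyx : y ≤ x := by
              have : ∀ z ∈ r, y ≤ z := (List.pairwise_cons.mp hs').1
              exact this x h
            have hxy' : x ≤ y := hxle y (by simp)
            exact hxy (le_antisymm hxy' hyx)
        rw [show pvAdjDup (x :: y :: r) = pvAdjDup (y :: r) by simp [pvAdjDup, hxy]]
        rw [ih hs']
        simp [List.nodup_cons, hxnot]

-- per-row agreement of the two inner loops
theorem pvRow_eq (row : List Int) :
    pvARow row PySem.Set.empty
      = !pvAdjDup (PySem.List.sorted (row.filter (fun v => v != 0)) (fun x => x) false) := by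
  have hperm : (PySem.List.sorted (row.filter (fun v => v != 0)) (fun x : Int => x) false).Perm
      (row.filter (fun v => v != 0)) := PySem.List.sorted_perm _ _ _
  have hpair : (PySem.List.sorted (row.filter (fun v => v != 0)) (fun x : Int => x) false).Pairwise
      (· ≤ ·) := by
    simpa using PySem.List.sorted_pairwise (xs := row.filter (fun v => v != 0)) (key := fun x : Int => x)
  have hA : pvARow row PySem.Set.empty = true ↔ (row.filter (fun v => v != 0)).Nodup := by
    rw [pvARow_true_iff]; simp [PySem.Set.empty]
  have hB := pvAdjDup_sorted_iff _ hpair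
  rw [hperm.nodup_iff] at hB
  cases hA' : pvARow row PySem.Set.empty with
  | false =>
    rw [hA'] at hA
    have hnot : ¬ (row.filter (fun v => v != 0)).Nodup := by
      intro h
      have : (false : Bool) = true := hA.mpr h
      simp at this
    have : pvAdjDup (PySem.List.sorted (row.filter (fun v => v != 0)) (fun x : Int => x) false)
        = true := hB.mpr hnot
    simp [this]
  | true =>
    rw [hA'] at hA
    have hnd : (row.filter (fun v => v != 0)).Nodup := hA.mp rfl
    have : pvAdjDup (PySem.List.sorted (row.filter (fun v => v != 0)) (fun x : Int => x) false)
        = false := by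
      cases h : pvAdjDup (PySem.List.sorted (row.filter (fun v => v != 0)) (fun x : Int => x) false)
      · rfl
      · exact absurd (hB.mp h) (by simp [hnd])
    simp [this]

theorem pvLoop_eq (board : List (List Int)) (rs : List Int) :
    pvALoop board rs = pvBLoop board rs := by
  induction rs with
  | nil => rfl
  | cons r rest ih =>
    simp only [pvALoop, pvBLoop]
    cases h : PySem.List.pyGet? board r with
    | none => rfl
    | some row =>
      have hrow := pvRow_eq row
      simp only [PySem.Set.empty] at hrow
      cases hd : pvAdjDup (PySem.List.sorted (row.filter (fun v => v != 0)) (fun x => x) false) <;>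
        simp [hrow, hd, ih]

-- ===== VERDICT (by name: the statement is the Claim_ definition above) =====
theorem validate_cols_spec : Claim_equal_validate_cols := by
  intro board _ _
  unfold Spec_validate_cols validate_cols validate_cols_alt
  exact pvLoop_eq board _
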